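-- pv_equiv track=rewrite | github.com/Vetrivelmaran/function_programs | 32.py | check
-- ===== SOURCE A (Python) =====
-- def check(a):
--     count=0
--     for i in range(len(a)):
--         for j in range(i+1,len(a)):
--             if len(a[i])<len(a[j]):
--                 count+=1
--                 break
--     if count==len(a)-1:
--         return 'assendin'
--     else:
--         return 'desending'
-- ===== SOURCE B (Python) =====
-- def check(a):
--     count = 0
--     mx = -1
--     for s in reversed(a):
--         if len(s) < mx:
--             count += 1
--         if len(s) > mx:
--             mx = len(s)
--     if count == len(a) - 1:
--         return 'assendin'
--     else:
--         return 'desending'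
-- ===== Notes on version B (the rewrite author's own statement) =====
-- stated objective: faster
-- what changed: replaces the quadratic nested scan (for each element, scan the rest for a longer one) by a single right-to-left pass maintaining the running maximum of later lengths
import Mathlib
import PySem

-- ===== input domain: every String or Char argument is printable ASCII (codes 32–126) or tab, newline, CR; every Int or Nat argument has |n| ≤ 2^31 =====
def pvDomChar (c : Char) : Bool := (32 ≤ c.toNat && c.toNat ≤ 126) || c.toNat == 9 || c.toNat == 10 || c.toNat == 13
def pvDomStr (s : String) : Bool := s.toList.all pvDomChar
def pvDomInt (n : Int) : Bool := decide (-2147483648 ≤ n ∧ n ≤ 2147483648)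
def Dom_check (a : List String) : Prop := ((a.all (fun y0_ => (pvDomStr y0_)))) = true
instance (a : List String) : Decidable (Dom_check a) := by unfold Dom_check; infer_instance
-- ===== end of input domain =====

-- B replaces A's quadratic nested scan by one right-to-left pass with a running maximum of later lengths (asymptotically faster).


-- ===== PORT A =====
-- inner loop: 'for j in range(i+1, len(a)): if len(a[i])<len(a[j]): count+=1; break'
-- (the elements a[j] for j>i are exactly the suffix after a[i]; the break is the early-return true)
def checkFind (x : String) (rest : List String) : Bool :=
  match rest with
  | [] => false
  | y :: ys => if x.toList.length < y.toList.length then true else checkFind x ys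

-- outer loop over i, carrying count
def checkLoop (l : List String) (count : Nat) : Nat :=
  match l with
  | [] => count
  | x :: rest => checkLoop rest (if checkFind x rest then count + 1 else count)

def check (a : List String) : String :=
  let count := checkLoop a 0
  if (count : Int) = (a.length : Int) - 1 then "assendin" else "desending"

-- ===== PORT B =====
-- single pass over reversed(a), state = (count, mx = max length seen so far, initially -1)
def checkAltStep (st : Nat × Int) (s : String) : Nat × Int :=
  ((if (s.toList.length : Int) < st.2 then st.1 + 1 else st.1),
   (if (s.toList.length : Int) > st.2 then (s.toList.length : Int) else st.2))

def check_alt (a : List String) : String :=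
  let st := a.reverse.foldl checkAltStep (0, -1)
  if (st.1 : Int) = (a.length : Int) - 1 then "assendin" else "desending"

-- ===== PRECONDITION & SPEC =====
def Spec_check (a : List String) (out : String) : Prop := out = check_alt a
instance (a : List String) (out : String) : Decidable (Spec_check a out) := by unfold Spec_check; infer_instance

-- ===== CLAIM (what is proved, stated in full; the proofs are below) =====
def Claim_equal_check : Prop := ∀ (a : List String), Dom_check a → Spec_check a (check a)

-- ===== LEMMAS AND PROOFS =====

-- the count as a pure structural function
def pvCnt : List String → Nat
  | [] => 0
  | x :: rest => (if checkFind x rest then 1 else 0) + pvCnt rest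

theorem checkLoop_eq (l : List String) (c : Nat) : checkLoop l c = c + pvCnt l := by
  induction l generalizing c with
  | nil => simp [checkLoop, pvCnt]
  | cons x rest ih =>
      simp only [checkLoop, pvCnt, ih]
      split <;> omega

-- the B fold's second component is the max of the lengths (−1 for [])
def pvMaxLen : List String → Int
  | [] => -1
  | x :: rest => if (x.toList.length : Int) > pvMaxLen rest then (x.toList.length : Int) else pvMaxLen rest

theorem checkFind_iff (x : String) (l : List String) :
    checkFind x l = true ↔ (x.toList.length : Int) < pvMaxLen l := by
  induction l with
  | nil =>
      simp only [checkFind, pvMaxLen]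
      constructor
      · intro h; exact absurd h (by simp)
      · intro h; omega
  | cons y ys ih =>
      simp only [checkFind, pvMaxLen]
      by_cases h1 : x.toList.length < y.toList.length
      · simp only [if_pos h1]
        refine ⟨fun _ => ?_, fun _ => trivial⟩
        split <;> omega
      · simp only [if_neg h1, ih]
        split <;> constructor <;> intro h <;> omega

theorem foldr_checkAlt (a : List String) :
    a.foldr (fun s st => checkAltStep st s) (0, -1) = (pvCnt a, pvMaxLen a) := by
  induction a with
  | nil => simp [pvCnt, pvMaxLen]
  | cons x rest ih =>
      rw [List.foldr_cons, ih]
      simp only [checkAltStep, pvCnt, pvMaxLen]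
      by_cases h : (x.toList.length : Int) < pvMaxLen rest
      · rw [if_pos h, if_pos ((checkFind_iff x rest).mpr h)]
        exact Prod.ext_iff.mpr ⟨by omega, rfl⟩
      · rw [if_neg h, if_neg (fun hc => h ((checkFind_iff x rest).mp hc))]
        simp

theorem check_eq_alt (a : List String) : check a = check_alt a := by
  simp only [check, check_alt, checkLoop_eq, Nat.zero_add, List.foldl_reverse, foldr_checkAlt]

-- ===== VERDICT (by name: the statement is the Claim_ definition above) =====
theorem check_spec : Claim_equal_check := by
  intro a _
  unfold Spec_check
  exact check_eq_alt a
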